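-- pv_equiv track=rewrite | github.com/belilovsky/total-kz | scraper/fix_tokayev_photos.py | find_duplicate_photos
-- ===== SOURCE A (Python) =====
-- from collections import defaultdict
--
-- def find_duplicate_photos(articles):
--     """Find articles sharing the same main_image."""
--     img_to_articles = defaultdict(list)
--     for a in articles:
--         img = a['main_image']
--         if img and img.strip():
--             img_norm = img.replace('https://total.kz', '').strip()
--             img_to_articles[img_norm].append(a)
--     return {k: v for k, v in img_to_articles.items() if len(v) > 1}
-- ===== SOURCE B (Python) =====
-- def find_duplicate_photos(articles):
--     """Find articles sharing the same main_image."""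
--     keyed = [(a['main_image'].replace('https://total.kz', '').strip(), a)
--              for a in articles
--              if a['main_image'] and a['main_image'].strip()]
--     keys = [k for k, _ in keyed]
--     result = {}
--     for k in dict.fromkeys(keys):
--         if keys.count(k) > 1:
--             result[k] = [a for kk, a in keyed if kk == k]
--     return result
-- ===== Notes on version B (the rewrite author's own statement) =====
-- stated objective: alternative
-- what changed: Replaces the defaultdict accumulation pass with a count-and-gather decomposition: normalize keys once into a keyed list, then for each first-occurring key whose count exceeds 1 collect its group by a direct scan of the keyed list.
import Mathlib
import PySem

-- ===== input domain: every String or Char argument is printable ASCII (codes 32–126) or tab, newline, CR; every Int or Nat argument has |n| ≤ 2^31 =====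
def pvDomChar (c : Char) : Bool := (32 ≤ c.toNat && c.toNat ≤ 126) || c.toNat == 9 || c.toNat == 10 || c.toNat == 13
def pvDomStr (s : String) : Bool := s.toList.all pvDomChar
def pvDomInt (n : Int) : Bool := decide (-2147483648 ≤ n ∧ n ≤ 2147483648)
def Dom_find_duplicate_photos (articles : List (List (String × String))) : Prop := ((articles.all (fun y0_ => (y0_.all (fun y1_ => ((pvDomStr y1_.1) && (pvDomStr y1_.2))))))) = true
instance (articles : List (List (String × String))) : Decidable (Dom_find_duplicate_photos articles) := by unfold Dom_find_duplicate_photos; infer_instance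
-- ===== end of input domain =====

-- B replaces A's defaultdict accumulation with a count-and-gather pass over a normalized keyed list (alternative decomposition, not faster).


-- ===== PORT A =====
def find_duplicate_photos (articles : List (List (String × String))) : List (String × List (List (String × String))) :=
  let img_to_articles : PySem.Dict String (List (List (String × String))) :=
    articles.foldl (fun d a =>
      match List.lookup "main_image" a with
      | none => d  -- Python raises KeyError here; excluded by Pre_
      | some img =>
        if img ≠ "" ∧ PySem.Str.strip img ≠ "" then
          d.modify (PySem.Str.strip (PySem.Str.replace img "https://total.kz" "")) []
            (fun v => v ++ [a])
        else d) PySem.Dict.empty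
  img_to_articles.items.filter (fun kv => kv.2.length > 1)

-- ===== PORT B =====
-- B-side helper: normalized key of one article (None = filtered out / missing key).
def pvNormKey (a : List (String × String)) : Option (String × List (String × String)) :=
  match List.lookup "main_image" a with
  | none => none  -- Python raises KeyError here; excluded by Pre_
  | some img =>
    if img ≠ "" ∧ PySem.Str.strip img ≠ "" then
      some (PySem.Str.strip (PySem.Str.replace img "https://total.kz" ""), a)
    else none

def find_duplicate_photos_alt (articles : List (List (String × String))) : List (String × List (List (String × String))) :=
  let keyed := articles.filterMap pvNormKey
  let keys := keyed.map Prod.fst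
  (PySem.List.dedup keys).foldl (fun res k =>
    if keys.count k > 1 then
      res ++ [(k, (keyed.filter (fun p => p.1 == k)).map Prod.snd)]
    else res) []

-- ===== PRECONDITION & SPEC =====
-- Pre_ excludes exactly the articles lacking a 'main_image' key, on which Python A raises KeyError.
def Pre_find_duplicate_photos (articles : List (List (String × String))) : Prop :=
  ∀ a ∈ articles, "main_image" ∈ a.map Prod.fst
instance (articles : List (List (String × String))) : Decidable (Pre_find_duplicate_photos articles) := by unfold Pre_find_duplicate_photos; infer_instance
def pvWitness_find_duplicate_photos : (List (List (String × String))) :=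
  [[("main_image", "/x.jpg")], [("main_image", "https://total.kz/x.jpg")], [("main_image", "")]]
def Spec_find_duplicate_photos (articles : List (List (String × String))) (out : List (String × List (List (String × String)))) : Prop := out = find_duplicate_photos_alt articles
instance (articles : List (List (String × String))) (out : List (String × List (List (String × String)))) : Decidable (Spec_find_duplicate_photos articles out) := by unfold Spec_find_duplicate_photos; infer_instance

-- ===== CLAIM (what is proved, stated in full; the proofs are below) =====
def Claim_equal_find_duplicate_photos : Prop := ∀ (articles : List (List (String × String))), Dom_find_duplicate_photos articles → Pre_find_duplicate_photos articles → Spec_find_duplicate_photos articles (find_duplicate_photos articles)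

-- ===== LEMMAS AND PROOFS =====

-- A's skip-or-modify fold over articles is the plain modify fold over B's keyed list.
theorem pv_foldA_eq_foldKeyed (l : List (List (String × String)))
    (d : PySem.Dict String (List (List (String × String)))) :
    l.foldl (fun d a =>
      match List.lookup "main_image" a with
      | none => d
      | some img =>
        if img ≠ "" ∧ PySem.Str.strip img ≠ "" then
          d.modify (PySem.Str.strip (PySem.Str.replace img "https://total.kz" "")) []
            (fun v => v ++ [a])
        else d) d
    = (l.filterMap pvNormKey).foldl (fun d p => d.modify p.1 [] (fun v => v ++ [p.2])) d := by
  induction l generalizing d with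
  | nil => rfl
  | cons a l ih =>
    cases h : List.lookup "main_image" a with
    | none =>
      have hk : pvNormKey a = none := by simp [pvNormKey, h]
      simp only [List.foldl_cons, List.filterMap_cons, hk, h]
      exact ih d
    | some img =>
      have hk : pvNormKey a = (if img ≠ "" ∧ PySem.Str.strip img ≠ "" then
          some (PySem.Str.strip (PySem.Str.replace img "https://total.kz" ""), a) else none) := by
        simp [pvNormKey, h]
      by_cases hc : img ≠ "" ∧ PySem.Str.strip img ≠ ""
      · simp only [List.foldl_cons, List.filterMap_cons, hk, h, if_pos hc]
        exact ih _
      · simp only [List.foldl_cons, List.filterMap_cons, hk, h, if_neg hc]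
        exact ih d

-- keys.count k is the size of k's group in keyed (keys = keyed.map Prod.fst).
theorem pv_count_eq_length (keyed : List (String × List (String × String))) (k : String) :
    (keyed.map Prod.fst).count k = (keyed.filter (fun p => p.1 == k)).length := by
  rw [← List.countP_eq_length_filter, List.count_eq_countP', List.countP_map]
  rfl

theorem find_duplicate_photos_eq (articles : List (List (String × String))) :
    find_duplicate_photos articles = find_duplicate_photos_alt articles := by
  dsimp only [find_duplicate_photos, find_duplicate_photos_alt]
  rw [pv_foldA_eq_foldKeyed]
  set keyed := articles.filterMap pvNormKey with hkeyed
  have hnodup : ((keyed.foldl (fun d p => d.modify p.1 [] (fun v => v ++ [p.2]))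
      (PySem.Dict.empty : PySem.Dict String (List (List (String × String))))).keys).Nodup := by
    exact PySem.Dict.nodup_keys_foldl_modify_key keyed Prod.fst []
      (fun _ p => fun v => v ++ [p.2]) PySem.Dict.empty (by simp [PySem.Dict.empty, PySem.Dict.keys])
  have hkeys : (keyed.foldl (fun d p => d.modify p.1 [] (fun v => v ++ [p.2]))
      (PySem.Dict.empty : PySem.Dict String (List (List (String × String))))).keys
      = PySem.List.dedup (keyed.map Prod.fst) := by
    rw [PySem.List.dedup_eq_ofList]
    have := PySem.Dict.keys_foldl_modify_key keyed Prod.fst []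
      (fun _ p => fun v => v ++ [p.2])
      (PySem.Dict.empty : PySem.Dict String (List (List (String × String))))
    simpa [PySem.Dict.empty, PySem.Dict.keys, PySem.Set.update_nil_left] using this
  rw [PySem.Dict.items_eq_map_keys _ hnodup [], hkeys]
  have hg : ∀ k, (keyed.foldl (fun d p => d.modify p.1 [] (fun v => v ++ [p.2]))
      (PySem.Dict.empty : PySem.Dict String (List (List (String × String))))).getD k []
      = (keyed.filter (fun p => p.1 == k)).map Prod.snd := fun k => by
    simpa using PySem.Dict.getD_foldl_modify_append keyed PySem.Dict.empty k
  simp only [hg]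
  have hfold : ∀ (dd : List String) (acc : List (String × List (List (String × String)))),
      dd.foldl (fun res k => if (keyed.map Prod.fst).count k > 1 then
          res ++ [(k, (keyed.filter (fun p => p.1 == k)).map Prod.snd)] else res) acc
      = acc ++ (dd.filter (fun k => decide ((keyed.map Prod.fst).count k > 1))).map
          (fun k => (k, (keyed.filter (fun p => p.1 == k)).map Prod.snd)) := by
    intro dd
    induction dd with
    | nil => intro acc; simp
    | cons x xs ih =>
      intro acc
      by_cases h : (keyed.map Prod.fst).count x > 1 <;> simp [h, ih]
  rw [hfold, List.filter_map, List.nil_append]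
  apply congrArg (List.map _)
  apply List.filter_congr
  intro k _
  simp [pv_count_eq_length]

-- ===== VERDICT (by name: the statement is the Claim_ definition above) =====
theorem find_duplicate_photos_spec : Claim_equal_find_duplicate_photos := by
  intro articles _ _
  unfold Spec_find_duplicate_photos
  exact find_duplicate_photos_eq articles
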